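-- pv_equiv track=rewrite | github.com/poushwell/orchesis | src/orchesis/fleet_coordinator.py | _matches_capabilities
-- ===== SOURCE A (Python) =====
-- from typing import Any
--
-- def _matches_capabilities(agent: dict[str, Any], required: list[str]) -> bool:
--     if not required:
--         return True
--     caps = {
--         str(item).strip().lower()
--         for item in agent.get("capabilities", [])
--         if str(item).strip()
--     }
--     return all(item.lower() in caps for item in required)
-- ===== SOURCE B (Python) =====
-- def _matches_capabilities(agent: dict, required: list) -> bool:
--     if not required:
--         return True
--     need = sorted(item.lower() for item in required)
--     caps = sorted(s for s in (str(c).strip().lower() for c in agent.get("capabilities", [])) if s)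
--     i = j = 0
--     while i < len(need):
--         if j >= len(caps) or caps[j] > need[i]:
--             return False
--         if caps[j] < need[i]:
--             j += 1
--         else:
--             i += 1
--     return True
-- ===== Notes on version B (the rewrite author's own statement) =====
-- stated objective: alternative
-- what changed: B replaces A's hash-set membership test with sort-then-merge: it sorts the normalized required items and the normalized non-blank capabilities and checks subset inclusion with a single two-pointer merge scan.
import Mathlib
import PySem

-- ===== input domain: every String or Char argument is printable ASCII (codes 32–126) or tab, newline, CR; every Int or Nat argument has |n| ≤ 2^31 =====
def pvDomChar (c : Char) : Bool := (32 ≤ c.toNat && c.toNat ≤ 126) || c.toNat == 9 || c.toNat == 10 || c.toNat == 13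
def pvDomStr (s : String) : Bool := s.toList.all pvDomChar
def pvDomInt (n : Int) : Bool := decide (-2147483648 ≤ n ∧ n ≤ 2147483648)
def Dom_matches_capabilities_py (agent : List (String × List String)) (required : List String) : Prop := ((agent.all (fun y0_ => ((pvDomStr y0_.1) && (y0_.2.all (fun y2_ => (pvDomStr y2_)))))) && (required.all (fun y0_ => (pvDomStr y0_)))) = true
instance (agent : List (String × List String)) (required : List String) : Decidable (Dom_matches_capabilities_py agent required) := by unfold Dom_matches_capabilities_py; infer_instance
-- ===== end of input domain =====

-- B replaces A's hash-set membership with sort-then-merge: sorted normalized lists and a two-pointer subset scan (alternative algorithm, same behaviour).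


-- ===== PORT A =====
def matches_capabilities_py (agent : List (String × List String)) (required : List String) : Bool :=
  if required = [] then true
  else
    let capsIter := ((agent.find? (fun p => p.1 == "capabilities")).map (·.2)).getD []
    let caps : PySem.Set String := PySem.Set.ofList (capsIter.filterMap
      (fun item => if PySem.Str.strip item ≠ "" then some (PySem.Str.lower (PySem.Str.strip item)) else none))
    required.all (fun item => caps.contains (PySem.Str.lower item))

-- ===== PORT B =====
-- two-pointer merge subset check on two sorted lists (Source B's while loop; dropping
-- the head of `caps` is Source B's `j += 1`, dropping the head of `need` is `i += 1`)
def pvSubMerge : List String → List String → Bool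
  | [], _ => true
  | _ :: _, [] => false
  | n :: ns, c :: cs =>
    if n < c then false
    else if c < n then pvSubMerge (n :: ns) cs
    else pvSubMerge ns (c :: cs)
termination_by need caps => (need.length, caps.length)

def matches_capabilities_py_alt (agent : List (String × List String)) (required : List String) : Bool :=
  if required = [] then true
  else
    let need := PySem.List.sorted (required.map (fun item => PySem.Str.lower item)) (fun x => x) false
    let capsList := ((agent.find? (fun p => p.1 == "capabilities")).map (·.2)).getD []
    let caps := PySem.List.sorted
      ((capsList.map (fun c => PySem.Str.lower (PySem.Str.strip c))).filter (fun s => s ≠ ""))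
      (fun x => x) false
    pvSubMerge need caps

-- ===== PRECONDITION & SPEC =====
def Spec_matches_capabilities_py (agent : List (String × List String)) (required : List String) (out : Bool) : Prop := out = matches_capabilities_py_alt agent required
instance (agent : List (String × List String)) (required : List String) (out : Bool) : Decidable (Spec_matches_capabilities_py agent required out) := by unfold Spec_matches_capabilities_py; infer_instance

-- ===== CLAIM (what is proved, stated in full; the proofs are below) =====
def Claim_equal_matches_capabilities_py : Prop := ∀ (agent : List (String × List String)) (required : List String), Dom_matches_capabilities_py agent required → Spec_matches_capabilities_py agent required (matches_capabilities_py agent required)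

-- ===== LEMMAS AND PROOFS =====

-- the merge scan on two sorted lists decides the subset question
lemma pvSubMerge_iff (need caps : List String)
    (hn : need.Pairwise (· ≤ ·)) (hc : caps.Pairwise (· ≤ ·)) :
    pvSubMerge need caps = true ↔ ∀ x ∈ need, x ∈ caps := by
  fun_induction pvSubMerge need caps with
  | case1 caps => simp
  | case2 n ns => simp only [Bool.false_eq_true, false_iff]; intro h; exact absurd (h n (by simp)) (by simp)
  | case3 n ns c cs hnc => -- n < c: n is smaller than every capability left, so it is missing
    simp only [Bool.false_eq_true, false_iff]
    intro h
    have hmem := h n (by simp)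
    rcases List.mem_cons.mp hmem with rfl | hcs
    · exact lt_irrefl n hnc
    · have := (List.pairwise_cons.mp hc).1 n hcs
      exact absurd (lt_of_lt_of_le hnc this) (lt_irrefl n)
  | case4 n ns c cs hnc hcn ih => -- c < n: c matches nothing still needed, drop it
    rw [ih hn (List.pairwise_cons.mp hc).2]
    constructor
    · intro h x hx
      exact List.mem_cons_of_mem _ (h x hx)
    · intro h x hx
      rcases List.mem_cons.mp (h x hx) with rfl | h'
      · rcases List.mem_cons.mp hx with rfl | hns
        · exact absurd hcn (lt_irrefl x)
        · have := (List.pairwise_cons.mp hn).1 x hns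
          exact absurd (lt_of_lt_of_le hcn this) (lt_irrefl x)
      · exact h'
  | case5 n ns c cs hnc hcn ih => -- n = c: the requirement is met
    have heq : n = c := le_antisymm (not_lt.mp hcn) (not_lt.mp hnc)
    subst heq
    rw [ih (List.pairwise_cons.mp hn).2 hc]
    constructor
    · intro h x hx
      rcases List.mem_cons.mp hx with rfl | hns
      · simp
      · exact h x hns
    · intro h x hx
      exact h x (List.mem_cons_of_mem _ hx)

lemma lower_eq_nil_iff (s : String) : PySem.Str.lower s = "" ↔ s = "" := by
  constructor
  · intro h
    have := congrArg String.toList h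
    simp [pysem, PySem.Chars.lower] at this ⊢
    exact this
  · rintro rfl; rfl

-- A filters before normalizing, B filters after: same members
lemma filter_lists_mem (cs : List String) (x : String) :
    x ∈ cs.filterMap (fun item => if PySem.Str.strip item ≠ "" then some (PySem.Str.lower (PySem.Str.strip item)) else none)
    ↔ x ∈ (cs.map (fun c => PySem.Str.lower (PySem.Str.strip c))).filter (fun s => s ≠ "") := by
  simp only [List.mem_filter, List.mem_map, List.mem_filterMap, Option.ite_none_right_eq_some,
    Option.some.injEq, ne_eq, decide_not]
  constructor
  · rintro ⟨c, hc, hne, rfl⟩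
    exact ⟨⟨c, hc, rfl⟩, by simpa [lower_eq_nil_iff]⟩
  · rintro ⟨⟨c, hc, rfl⟩, hne⟩
    refine ⟨c, hc, ?_, rfl⟩
    simpa [lower_eq_nil_iff] using hne

-- ===== VERDICT (by name: the statement is the Claim_ definition above) =====
theorem matches_capabilities_py_spec : Claim_equal_matches_capabilities_py := by
  intro agent required _
  unfold Spec_matches_capabilities_py matches_capabilities_py matches_capabilities_py_alt
  split
  · rfl
  · rw [Bool.eq_iff_iff]
    rw [pvSubMerge_iff _ _ (PySem.List.sorted_pairwise _ _) (PySem.List.sorted_pairwise _ _)]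
    simp only [List.all_eq_true, PySem.Set.contains_eq_listContains, List.contains_eq_mem,
      PySem.Set.mem_ofList, decide_eq_true_eq, PySem.List.mem_sorted, List.mem_map,
      forall_exists_index, and_imp]
    constructor
    · rintro h x item hitem rfl
      exact (filter_lists_mem _ _).mp (h item hitem)
    · intro h item hitem
      exact (filter_lists_mem _ _).mpr (h (PySem.Str.lower item) item hitem rfl)
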